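-- pv_equiv track=rewrite | github.com/Mahnoor-Ghaffar/Physical_AI_-_Humanoid_Robotics_AI-Native_Textbook | src/simulation/omniverse/annotation_tools.py | merge_annotations
-- ===== SOURCE A (Python) =====
-- from typing import Dict, Any, List, Tuple, Optional
--
-- def merge_annotations(annotation_list: List[Dict[str, Any]]) -> Dict[str, Any]:
--     """
--     Merge multiple annotation dictionaries into one
--
--     Args:
--         annotation_list: List of annotation dictionaries
--
--     Returns:
--         Merged annotation dictionary
--     """
--     if not annotation_list:
--         return {}
--
--     merged = annotation_list[0].copy()
--
--     for annotation in annotation_list[1:]: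
--         # Merge dictionaries, preferring values from later annotations
--         for key, value in annotation.items():
--             if key not in merged:
--                 merged[key] = value
--             elif isinstance(value, dict) and isinstance(merged[key], dict):
--                 # Recursively merge nested dictionaries
--                 merged[key] = {**merged[key], **value}
--             else:
--                 # For non-dict values, use the value from the later annotation
--                 merged[key] = value
--
--     return merged
-- ===== SOURCE B (Python) =====
-- from typing import Dict, Any, List
--
--
-- def merge_annotations(annotation_list: List[Dict[str, Any]]) -> Dict[str, Any]:
--     """Two-phase merge: flatten all items once, take last-wins values via
--     dict(), and rebuild in first-seen key order."""
--     flat = [kv for annotation in annotation_list for kv in annotation.items()]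
--     last = dict(flat)  # later annotations win
--     seen = set()
--     order = []
--     for key, _ in flat:
--         if key not in seen:
--             seen.add(key)
--             order.append(key)
--     return {key: last[key] for key in order}
-- ===== Notes on version B (the rewrite author's own statement) =====
-- stated objective: alternative
-- what changed: Replaces the stateful copy-then-per-annotation merge loop with a two-phase pass: flatten all items once, compute last-wins values with a single dict(flat), and rebuild the result in first-seen key order; values are plain (non-dict) ints here so the nested-dict branch of A is dead.
import Mathlib
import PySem

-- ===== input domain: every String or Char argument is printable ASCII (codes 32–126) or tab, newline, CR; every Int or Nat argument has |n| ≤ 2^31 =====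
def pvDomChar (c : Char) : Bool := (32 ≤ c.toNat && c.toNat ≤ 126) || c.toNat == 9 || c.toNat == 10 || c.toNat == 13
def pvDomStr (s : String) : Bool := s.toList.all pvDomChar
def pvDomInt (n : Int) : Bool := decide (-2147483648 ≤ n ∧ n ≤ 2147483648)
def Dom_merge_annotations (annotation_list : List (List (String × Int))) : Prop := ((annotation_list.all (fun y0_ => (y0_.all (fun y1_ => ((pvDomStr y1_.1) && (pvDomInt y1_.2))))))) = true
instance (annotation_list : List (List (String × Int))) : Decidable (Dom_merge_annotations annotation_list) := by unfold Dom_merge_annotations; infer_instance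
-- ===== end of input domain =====

-- B replaces A's stateful copy-then-per-annotation merge with a flatten / last-wins-dict /
-- first-seen-key-order rebuild (alternative decomposition, same cost).

-- ===== PORT A =====
def merge_annotations (annotation_list : List (List (String × Int))) : List (String × Int) :=
  match annotation_list with
  | [] => []     -- if not annotation_list: return {}
  | first :: rest =>
    -- merged = annotation_list[0].copy()  (a dict's items ARE its association list)
    let merged0 : PySem.Dict String Int := PySem.Dict.mk first
    -- for annotation in annotation_list[1:]: for key, value in annotation.items(): ...
    let merged := rest.foldl (fun m annotation =>
      annotation.foldl (fun m kv =>
        if m.contains kv.1 = false then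
          m.insert kv.1 kv.2          -- key not in merged: merged[key] = value
        else
          -- values are Int, never dicts, so the isinstance-dict branch is dead;
          -- the remaining else branch is also merged[key] = value
          m.insert kv.1 kv.2) m) merged0
    merged.items

-- ===== PORT B =====
def merge_annotations_alt (annotation_list : List (List (String × Int))) : List (String × Int) :=
  -- flat = [kv for annotation in annotation_list for kv in annotation.items()]
  let flat := annotation_list.flatMap (fun annotation => annotation)
  -- last = dict(flat)  (later entries win)
  let last := flat.foldl (fun d kv => d.insert kv.1 kv.2) (PySem.Dict.empty : PySem.Dict String Int)
  -- seen-set loop collecting keys in first-seen order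
  let order := PySem.Set.ofList (flat.map (fun kv => kv.1))
  -- {key: last[key] for key in order}; every key of order is in last, so the default 0 is never used
  order.map (fun k => (k, last.getD k 0))

-- ===== PRECONDITION & SPEC =====
-- Pre_ excludes inputs whose FIRST inner association list has duplicate keys: such a list does not
-- encode any Python dict (the tester's dict conversion collapses it), and A's 'merged = annotation_list[0].copy()'
-- is ambiguous on it; B deduplicates.
def Pre_merge_annotations (annotation_list : List (List (String × Int))) : Prop :=
  ∀ a ∈ annotation_list.take 1, (a.map Prod.fst).Nodup
instance (annotation_list : List (List (String × Int))) : Decidable (Pre_merge_annotations annotation_list) := by unfold Pre_merge_annotations; infer_instance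
def pvWitness_merge_annotations : (List (List (String × Int))) := [[("a", 1)], [("a", 2), ("b", 3)]]
def Spec_merge_annotations (annotation_list : List (List (String × Int))) (out : List (String × Int)) : Prop := out = merge_annotations_alt annotation_list
instance (annotation_list : List (List (String × Int))) (out : List (String × Int)) : Decidable (Spec_merge_annotations annotation_list out) := by unfold Spec_merge_annotations; infer_instance

-- ===== CLAIM (what is proved, stated in full; the proofs are below) =====
def Claim_equal_merge_annotations : Prop := ∀ (annotation_list : List (List (String × Int))), Dom_merge_annotations annotation_list → Pre_merge_annotations annotation_list → Spec_merge_annotations annotation_list (merge_annotations annotation_list)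

-- ===== LEMMAS AND PROOFS =====

-- On a duplicate-free association list, building the dict by repeated insert IS the literal dict.
theorem mk_eq_foldl_insert (a : List (String × Int)) (hnd : (a.map Prod.fst).Nodup) :
    PySem.Dict.mk a = a.foldl (fun m kv => m.insert kv.1 kv.2) PySem.Dict.empty := by
  refine (PySem.Dict.ext ?_).symm
  have h := PySem.Dict.items_foldl_insert_fresh (l := a) (k := Prod.fst) (v := Prod.snd)
      (d := (PySem.Dict.empty : PySem.Dict String Int))
      (fun p _ => PySem.Dict.contains_empty _) hnd
  simpa using h

theorem merge_annotations_spec_aux (annotation_list : List (List (String × Int)))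
    (hpre : Pre_merge_annotations annotation_list) :
    merge_annotations annotation_list = merge_annotations_alt annotation_list := by
  cases annotation_list with
  | nil => rfl
  | cons a rest =>
    have hnd : (a.map Prod.fst).Nodup := hpre a (by simp)
    show (rest.foldl (fun m annotation => annotation.foldl (fun m kv =>
          if m.contains kv.1 = false then m.insert kv.1 kv.2 else m.insert kv.1 kv.2) m)
          (PySem.Dict.mk a)).items = _
    -- the two live branches of A's inner loop coincide
    simp only [ite_self]
    -- the nested loop is one fold over the flattened items, and .copy() of a nodup dict is insert-by-insert
    rw [← List.foldl_flatten, mk_eq_foldl_insert a hnd, ← List.foldl_append]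
    -- the final dict has nodup keys; read its items off its keys
    have hkeys : ((a ++ rest.flatten).foldl (fun m kv => m.insert kv.1 kv.2) PySem.Dict.empty).keys.Nodup :=
      PySem.Dict.nodup_keys_foldl_insert_key _ Prod.fst (fun _ kv => kv.2) _ (PySem.Dict.nodup_keys_empty)
    rw [PySem.Dict.items_eq_map_keys _ hkeys 0,
        PySem.Dict.keys_foldl_insert_key (key := Prod.fst) (f := fun _ kv => kv.2)]
    simp only [merge_annotations_alt, List.flatMap_id', List.flatten_cons, PySem.Dict.keys_empty,
      PySem.Set.update, PySem.Set.ofList_eq_foldl]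

-- ===== VERDICT (by name: the statement is the Claim_ definition above) =====
theorem merge_annotations_spec : Claim_equal_merge_annotations := by
  intro l _ hpre
  exact merge_annotations_spec_aux l hpre
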